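-- pv_equiv track=rewrite | github.com/VIXXPARK/pythonAlgorithm | 프로그래머스/레벨2/n진수게임.py | solution
-- ===== SOURCE A (Python) =====
-- def zari(val,n):
--     if val==0: return '0'
--     ans=''
--     dic={0:'0',1:'1',2:'2',3:'3',4:'4',5:'5',6:'6',7:'7',8:'8',9:'9',10:'A',11:'B',12:'C',13:'D',14:'E',15:'F'}
--     while val:
--         ans+=dic[val%n]
--         val//=n
--     return ans[::-1]
--
-- def solution(n, t, m, p):
--     answer = ''
--     ans=''
--     val=0
--     cnt=0
--     while len(answer)<m*t:
--         answer+=zari(val,n)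
--         val+=1
--     for i in range(p-1,len(answer),m):
--         if cnt<t:
--             ans+=answer[i]
--         else:
--             break
--         cnt+=1
--     return ans
-- ===== SOURCE B (Python) =====
-- def to_base(val, n):
--     q, r = divmod(val, n)
--     rest = to_base(q, n) if q else ''
--     return rest + "0123456789ABCDEF"[r]
--
-- def solution(n, t, m, p):
--     needed = m * t
--     out = []
--     pos = 0
--     val = 0
--     while pos < needed:
--         for d in to_base(val, n):
--             if len(out) < t and pos == (p - 1) + len(out) * m:
--                 out.append(d)
--             pos += 1
--         val += 1
--     return ''.join(out)
-- ===== Notes on version B (the rewrite author's own statement) =====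
-- stated objective: faster
-- what changed: B is a single streaming pass: it walks the base-n digit stream of 0,1,2,... with a global position counter and collects a digit exactly when its position hits the next stride target p-1+collected*m, never materialising the whole concatenated string that A builds and then re-indexes in a second pass.
-- outside the precondition, e.g. on solution(2, 1, 1, 0): A returns '0', B returns ''; on solution(20, 1, 1, 1): A returns '0', B returns '0'
import Mathlib
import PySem

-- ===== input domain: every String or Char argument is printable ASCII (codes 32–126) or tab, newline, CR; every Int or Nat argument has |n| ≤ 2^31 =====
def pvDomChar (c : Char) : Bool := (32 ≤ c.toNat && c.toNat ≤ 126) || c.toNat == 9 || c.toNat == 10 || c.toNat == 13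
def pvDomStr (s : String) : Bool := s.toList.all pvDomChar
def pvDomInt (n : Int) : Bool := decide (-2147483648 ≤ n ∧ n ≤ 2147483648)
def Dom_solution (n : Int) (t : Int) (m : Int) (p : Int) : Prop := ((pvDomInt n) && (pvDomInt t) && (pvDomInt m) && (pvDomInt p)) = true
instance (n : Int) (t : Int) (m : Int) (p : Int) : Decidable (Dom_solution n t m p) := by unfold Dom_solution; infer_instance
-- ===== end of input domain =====

-- B replaces A's build-the-whole-string-then-index two passes by one streaming pass with a
-- position counter (objective: faster — A repeatedly re-concatenates onto the growing
-- m*t-character buffer, B never materialises that string).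

-- ===== PORT A =====
-- the dict literal 'dic' of zari
def zariDic : PySem.Dict Int Char :=
  PySem.Dict.ofList [(0,'0'),(1,'1'),(2,'2'),(3,'3'),(4,'4'),(5,'5'),(6,'6'),(7,'7'),
                     (8,'8'),(9,'9'),(10,'A'),(11,'B'),(12,'C'),(13,'D'),(14,'E'),(15,'F')]

-- 'while val: ans += dic[val%n]; val //= n' — fuel bounds the iteration count (val shrinks
-- strictly when 2 ≤ n, so val.toNat+1 fuel is always enough on Pre_); none = KeyError/divergence
def zariLoop (n : Int) : Nat → Int → List Char → Option (List Char)
  | 0, _, _ => none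
  | fuel+1, val, ans =>
    if val ≠ 0 then
      match zariDic.get? (PySem.Int.mod val n) with
      | none => none
      | some c => zariLoop n fuel (PySem.Int.floordiv val n) (ans ++ [c])
    else some ans

def zari (val n : Int) : Option (List Char) :=
  if val = 0 then some ['0']
  else (zariLoop n (val.toNat + 1) val []).map List.reverse

-- 'while len(answer) < m*t: answer += zari(val, n); val += 1' — each iteration adds ≥ 1 char,
-- so (m*t).toNat+1 fuel is always enough on Pre_.  'answer' is accumulated newest-first
-- (revAnswer, reversed once on exit) and its length is tracked in alen, so that the
-- list-level cost of Python's O(1)-amortized 'answer += s' / O(1) 'len(answer)' stays linear;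
-- the loop, its state and the values are the same.
def buildLoop (n mt : Int) : Nat → List Char → Int → Int → Option (List Char)
  | 0, _, _, _ => none
  | fuel+1, revAnswer, alen, val =>
    if alen < mt then
      match zari val n with
      | none => none
      | some s => buildLoop n mt fuel (s.reverse ++ revAnswer) (alen + s.length) (val + 1)
    else some revAnswer.reverse

-- 'for i in range(p-1, len(answer), m): if cnt < t: ans += answer[i] else: break; cnt += 1'
-- 'ans' is likewise accumulated newest-first and reversed on exit; 'answer' is passed as an
-- array so answer[i] is O(1) as in Python (i = p-1, p-1+m, … is nonnegative under Pre_)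
def selLoop (t : Int) (arr : Array Char) : List Int → Int → List Char → List Char
  | [], _, revAns => revAns.reverse
  | i :: rest, cnt, revAns =>
    if cnt < t then selLoop t arr rest (cnt + 1) ((arr[i.toNat]?.getD '!') :: revAns)
    else revAns.reverse

def solution (n : Int) (t : Int) (m : Int) (p : Int) : String :=
  match buildLoop n (m * t) ((m * t).toNat + 1) [] 0 0 with
  | none => ""   -- unreachable under Pre_ (Python raises / diverges there)
  | some answer =>
      String.mk (selLoop t answer.toArray (PySem.List.pyRange (p - 1) (answer.length : Int) m) 0 [])

-- ===== PORT B =====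
def altDigits : List Char := ['0','1','2','3','4','5','6','7','8','9','A','B','C','D','E','F']

-- to_base(val, n): q, r = divmod(val, n); (to_base(q, n) if q else '') + "0123…F"[r]
-- recursion on fuel (val shrinks strictly when 2 ≤ n, so val.toNat+1 fuel is enough on Pre_)
def toBase (n : Int) : Nat → Int → List Char
  | 0, _ => []
  | fuel+1, val =>
    (if PySem.Int.floordiv val n ≠ 0 then toBase n fuel (PySem.Int.floordiv val n) else [])
      ++ [(PySem.List.pyGet? altDigits (PySem.Int.mod val n)).getD '!']

-- body of B's inner 'for d in to_base(val, n)' loop; state = (pos, out newest-first, len(out));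
-- 'out.append(d)' is a cons (out reversed once at the end) and 'len(out)' the tracked counter,
-- both O(1) as in Python
def altStep (t m p : Int) (st : Int × List Char × Int) (d : Char) : Int × List Char × Int :=
  if st.2.2 < t ∧ st.1 = (p - 1) + st.2.2 * m then (st.1 + 1, d :: st.2.1, st.2.2 + 1)
  else (st.1 + 1, st.2.1, st.2.2)

-- 'while pos < needed: …digits of val…; val += 1' — (m*t).toNat+1 fuel is enough on Pre_
def altLoop (n t m p needed : Int) : Nat → Int → Int → List Char → Int → List Char
  | 0, _, _, outRev, _ => outRev
  | fuel+1, pos, val, outRev, cnt =>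
    if pos < needed then
      let st := (toBase n (val.toNat + 1) val).foldl (altStep t m p) (pos, outRev, cnt)
      altLoop n t m p needed fuel st.1 (val + 1) st.2.1 st.2.2
    else outRev

def solution_alt (n : Int) (t : Int) (m : Int) (p : Int) : String :=
  String.mk ((altLoop n t m p (m * t) ((m * t).toNat + 1) 0 0 [] 0).reverse)

-- ===== PRECONDITION & SPEC =====
-- Pre_ admits the problem's natural domain (base 2..16, t ≥ 1, m ≥ 1, 1 ≤ p) plus the
-- degenerate families on which A returns '' (t ≤ 0 with positive stride; a negative stride whose
-- selection loop stays empty). Outside Pre_ A raises KeyError (digit ∉ dic), ValueError (range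
-- step 0) or diverges (n ≤ 1) on most inputs, and where it does return (p ≤ 0, or a base > 16
-- whose needed digits happen to stay < 16) the value rests on accidental negative-index
-- wraparound resp. a lucky dict hit.
def Pre_solution (n : Int) (t : Int) (m : Int) (p : Int) : Prop :=
  (2 ≤ n ∧ n ≤ 16 ∧ 1 ≤ t ∧ 1 ≤ m ∧ 1 ≤ p)
  ∨ (1 ≤ m ∧ t ≤ 0)
  ∨ (m ≤ -1 ∧ 0 ≤ t ∧ p ≤ 1)
  ∨ (m ≤ -1 ∧ t ≤ -1 ∧ 2 ≤ n ∧ n ≤ 16)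
instance (n : Int) (t : Int) (m : Int) (p : Int) : Decidable (Pre_solution n t m p) := by
  unfold Pre_solution; infer_instance

def pvWitness_solution : Int × Int × Int × Int := (2, 4, 2, 1)

def Spec_solution (n : Int) (t : Int) (m : Int) (p : Int) (out : String) : Prop := out = solution_alt n t m p
instance (n : Int) (t : Int) (m : Int) (p : Int) (out : String) : Decidable (Spec_solution n t m p out) := by unfold Spec_solution; infer_instance

-- ===== CLAIM (what is proved, stated in full; the proofs are below) =====
def Claim_equal_solution : Prop := ∀ (n : Int) (t : Int) (m : Int) (p : Int), Dom_solution n t m p → Pre_solution n t m p → Spec_solution n t m p (solution n t m p)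

-- ===== LEMMAS AND PROOFS =====

-- canonical least-significant-first digit list both helpers produce
def rep (n : Int) : Nat → Int → List Char
  | 0, _ => []
  | fuel+1, val =>
    if val ≠ 0 then
      (PySem.List.pyGet? altDigits (PySem.Int.mod val n)).getD '!'
        :: rep n fuel (PySem.Int.floordiv val n)
    else []

-- the selected characters, indexed by how many were already collected (count c)
def pickA (t m p L : Int) (S : List Char) (c : Int) : List Char :=
  if h : c < t ∧ (p - 1) + c * m < L then
    PySem.List.pyGetD S ((p - 1) + c * m) '!' :: pickA t m p L S (c + 1)
  else []
termination_by (t - c).toNat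
decreasing_by omega

-- streaming selection: one character at a time, position j, count c
def pickF (t m p : Int) : List Char → Int → Int → List Char
  | [], _, _ => []
  | d :: ds, pos, c =>
    if c < t ∧ pos = (p - 1) + c * m then d :: pickF t m p ds (pos + 1) (c + 1)
    else pickF t m p ds (pos + 1) c

theorem dic_eq (r : Int) (h0 : 0 ≤ r) (h1 : r < 16) :
    zariDic.get? r = some ((PySem.List.pyGet? altDigits r).getD '!') := by
  interval_cases r <;> decide

theorem rep_zero (n : Int) (fuel : Nat) : rep n fuel 0 = [] := by
  cases fuel <;> simp [rep]

theorem zariLoop_eq (n : Int) (hn2 : 2 ≤ n) (hn16 : n ≤ 16) :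
    ∀ (fuel : Nat) (val : Int) (ans : List Char), 0 ≤ val → val < (fuel : Int) →
      zariLoop n fuel val ans = some (ans ++ rep n fuel val) := by
  intro fuel
  induction fuel with
  | zero => intro val ans h0 hf; exact absurd hf (by push_cast; omega)
  | succ f ih =>
    intro val ans h0 hf
    by_cases hv : val = 0
    · subst hv; simp [zariLoop, rep]
    · have hnpos : (0:Int) < n := by omega
      have hr0 : 0 ≤ PySem.Int.mod val n := by
        rw [PySem.Int.mod_eq_emod_of_pos hnpos]; exact Int.emod_nonneg _ (by omega)
      have hr1 : PySem.Int.mod val n < 16 := by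
        rw [PySem.Int.mod_eq_emod_of_pos hnpos]
        have := Int.emod_lt_of_pos val hnpos; omega
      have hq0 : 0 ≤ PySem.Int.floordiv val n := by
        rw [PySem.Int.floordiv_eq_ediv_of_pos hnpos]
        exact Int.ediv_nonneg h0 (by omega)
      have hqlt : PySem.Int.floordiv val n < val := by
        rw [PySem.Int.floordiv_eq_ediv_of_pos hnpos]
        exact Int.ediv_lt_of_lt_mul (by omega)
          (by simpa using mul_lt_mul_of_pos_left (show (1:Int) < n by omega)
                (show (0:Int) < val by omega))
      have hstep : zariLoop n (f+1) val ans
          = zariLoop n f (PySem.Int.floordiv val n)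
              (ans ++ [(PySem.List.pyGet? altDigits (PySem.Int.mod val n)).getD '!']) := by
        simp only [zariLoop, if_pos hv, dic_eq _ hr0 hr1]
      rw [hstep, ih _ _ hq0 (by push_cast at hf ⊢; omega)]
      simp [rep, hv]

theorem toBase_zero (n : Int) (hn2 : 2 ≤ n) (fuel : Nat) (hf : 1 ≤ fuel) :
    toBase n fuel 0 = ['0'] := by
  obtain ⟨f, rfl⟩ : ∃ f, fuel = f + 1 := ⟨fuel - 1, by omega⟩
  have hnpos : (0:Int) < n := by omega
  have hq : PySem.Int.floordiv 0 n = 0 := by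
    rw [PySem.Int.floordiv_eq_ediv_of_pos hnpos]; simp
  have hr : PySem.Int.mod 0 n = 0 := by
    rw [PySem.Int.mod_eq_emod_of_pos hnpos]; simp
  simp only [toBase, hq, hr]
  norm_num
  decide

theorem toBase_eq_pos (n : Int) (hn2 : 2 ≤ n) :
    ∀ (fuel : Nat) (val : Int), 1 ≤ val → val < (fuel : Int) →
      toBase n fuel val = (rep n fuel val).reverse := by
  intro fuel
  induction fuel with
  | zero => intro val h1 hf; exact absurd hf (by push_cast; omega)
  | succ f ih =>
    intro val h1 hf
    have hnpos : (0:Int) < n := by omega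
    have hq0 : 0 ≤ PySem.Int.floordiv val n := by
      rw [PySem.Int.floordiv_eq_ediv_of_pos hnpos]
      exact Int.ediv_nonneg (by omega) (by omega)
    have hqlt : PySem.Int.floordiv val n < val := by
      rw [PySem.Int.floordiv_eq_ediv_of_pos hnpos]
      exact Int.ediv_lt_of_lt_mul (by omega)
        (by simpa using mul_lt_mul_of_pos_left (show (1:Int) < n by omega)
              (show (0:Int) < val by omega))
    have hv : val ≠ 0 := by omega
    by_cases hq : PySem.Int.floordiv val n = 0
    · simp [toBase, rep, hq, hv, rep_zero]
    · have := ih (PySem.Int.floordiv val n) (by omega) (by push_cast at hf ⊢; omega)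
      simp [toBase, rep, hq, hv, this]

theorem digits_eq (n val : Int) (hn2 : 2 ≤ n) (hn16 : n ≤ 16) (hv : 0 ≤ val) :
    zari val n = some (toBase n (val.toNat + 1) val) := by
  by_cases hz : val = 0
  · subst hz; rw [toBase_zero n hn2 _ (by omega)]; simp [zari]
  · rw [zari, if_neg hz,
        zariLoop_eq n hn2 hn16 (val.toNat + 1) val [] hv (by omega),
        toBase_eq_pos n hn2 (val.toNat + 1) val (by omega) (by omega)]
    simp

theorem toBase_ne_nil (n : Int) (fuel : Nat) (hf : 1 ≤ fuel) (val : Int) :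
    toBase n fuel val ≠ [] := by
  obtain ⟨f, rfl⟩ : ∃ f, fuel = f + 1 := ⟨fuel - 1, by omega⟩
  simp [toBase]

theorem foldl_state (t m p : Int) :
    ∀ (ds : List Char) (pos : Int) (rout : List Char) (c : Int),
      ds.foldl (altStep t m p) (pos, rout, c)
        = (pos + ds.length, (pickF t m p ds pos c).reverse ++ rout,
           c + (pickF t m p ds pos c).length) := by
  intro ds
  induction ds with
  | nil => intro pos rout c; simp [pickF]
  | cons d ds ih =>
    intro pos rout c
    by_cases hC : (c < t ∧ pos = (p - 1) + c * m)
    · simp only [List.foldl_cons, altStep, if_pos hC]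
      rw [ih, pickF, if_pos hC]
      simp only [List.reverse_cons, List.length_cons, List.append_assoc,
        List.cons_append, List.nil_append]
      refine congrArg₂ _ ?_ (congrArg₂ _ rfl ?_) <;> (push_cast; ring)
    · simp only [List.foldl_cons, altStep, if_neg hC]
      rw [ih, pickF, if_neg hC]
      simp only [List.length_cons]
      refine congrArg₂ _ ?_ (congrArg₂ _ rfl rfl) <;> push_cast <;> ring

theorem pickF_stop (t m p : Int) :
    ∀ (ds : List Char) (pos c : Int), t ≤ c → pickF t m p ds pos c = [] := by
  intro ds
  induction ds with
  | nil => intro pos c _; rfl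
  | cons d ds ih =>
    intro pos c hc
    rw [pickF, if_neg (by rintro ⟨h1, -⟩; omega)]
    exact ih _ _ hc

theorem pickA_stop (t m p L : Int) (S : List Char) (c : Int) (h : t ≤ c) :
    pickA t m p L S c = [] := by
  rw [pickA, dif_neg (by rintro ⟨h1, -⟩; omega)]

theorem pyRange_pos_nil (a b s : Int) (hs : 0 < s) (h : b ≤ a) :
    PySem.List.pyRange a b s = [] := by
  rw [PySem.List.pyRange_of_pos _ _ hs, if_neg (by omega)]
  simp

theorem pyRange_pos_cons (a b s : Int) (hs : 0 < s) (h : a < b) :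
    PySem.List.pyRange a b s = a :: PySem.List.pyRange (a + s) b s := by
  rw [PySem.List.pyRange_of_pos _ _ hs, PySem.List.pyRange_of_pos _ _ hs, if_pos h]
  by_cases h2 : a + s < b
  · rw [if_pos h2]
    have e2 : (b - a + s - 1) / s = (b - (a + s) + s - 1) / s + 1 := by
      have e1 : b - a + s - 1 = (b - (a + s) + s - 1) + 1 * s := by ring
      rw [e1, Int.add_mul_ediv_right _ _ (by omega)]
    have hge : 0 ≤ (b - (a + s) + s - 1) / s := Int.ediv_nonneg (by omega) (by omega)
    have e3 : ((b - (a + s) + s - 1) / s + 1).toNat = ((b - (a + s) + s - 1) / s).toNat + 1 := by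
      omega
    rw [e2, e3, List.range_succ_eq_map]
    simp only [List.map_cons, List.map_map, Int.natCast_zero, mul_zero, add_zero]
    congr 1
    apply List.map_congr_left
    intro k _
    simp [Function.comp]
    ring
  · rw [if_neg h2]
    have hq : (b - a + s - 1) / s = 1 := by
      have := (PySem.Int.floordiv_eq_iff_of_pos (by omega : (0:Int) < s)).mpr
        (⟨by omega, by omega⟩ : 1 * s ≤ b - a + s - 1 ∧ b - a + s - 1 < (1 + 1) * s)
      rwa [PySem.Int.floordiv_eq_ediv_of_pos (by omega)] at this
    rw [hq]
    simp

theorem pickF_eq_pickA (t m p : Int) (hm : 1 ≤ m) (S : List Char) :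
    ∀ (s : List Char) (j c : Int), 0 ≤ j → j ≤ (p - 1) + c * m → s = S.drop j.toNat →
      pickF t m p s j c = pickA t m p (S.length : Int) S c := by
  intro s
  induction s with
  | nil =>
    intro j c hj0 hjt hs
    have hlen : S.length ≤ j.toNat := List.drop_eq_nil_iff.mp hs.symm
    rw [pickA, dif_neg (by rintro ⟨-, hlt⟩; omega)]
    rfl
  | cons d s' ih =>
    intro j c hj0 hjt hs
    by_cases hc : c < t
    · by_cases hj : j = (p - 1) + c * m
      · have hjlt : j.toNat < S.length := by
          by_contra hge
          rw [List.drop_eq_nil_iff.mpr (by omega)] at hs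
          exact List.cons_ne_nil _ _ hs
        have hdrop := List.drop_eq_getElem_cons hjlt
        rw [hdrop] at hs
        injection hs with hd hs'
        rw [pickF, if_pos ⟨hc, hj⟩, pickA, dif_pos ⟨hc, by omega⟩]
        congr 1
        · rw [← hj, PySem.List.pyGetD_eq_getElem S '!' hj0 (by omega)]
          exact hd
        · have ht1 : (p - 1) + (c + 1) * m = ((p - 1) + c * m) + m := by ring
          have ht2 : (j + 1).toNat = j.toNat + 1 := by omega
          exact ih (j + 1) (c + 1) (by omega) (by omega) (by rw [ht2]; exact hs')
      · have hjlt : j < (p - 1) + c * m := lt_of_le_of_ne hjt hj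
        rw [pickF, if_neg (by rintro ⟨-, h⟩; exact hj h)]
        have hs'' : s' = S.drop ((j + 1).toNat) := by
          have h1 : (S.drop j.toNat).drop 1 = S.drop (j.toNat + 1) := by
            rw [List.drop_drop]
          rw [← hs] at h1
          have ht2 : (j + 1).toNat = j.toNat + 1 := by omega
          rw [ht2, ← h1]
          rfl
        exact ih (j + 1) c (by omega) (by omega) hs''
    · rw [pickF_stop t m p _ _ _ (by omega), pickA_stop t m p _ _ _ (by omega)]

theorem arr_get_eq (S : List Char) (i : Int) (h0 : 0 ≤ i) (hlt : i < (S.length : Int)) :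
    (S.toArray[i.toNat]?).getD '!' = PySem.List.pyGetD S i '!' := by
  rw [PySem.List.pyGetD_eq_getElem S '!' h0 hlt, List.getElem?_toArray,
      List.getElem?_eq_getElem (by omega)]
  rfl

theorem selLoop_eq (t m p : Int) (hm : 1 ≤ m) (hp : 1 ≤ p) (S : List Char) :
    ∀ (k : Nat) (c : Int) (rans : List Char), 0 ≤ c → (t - c).toNat = k →
      selLoop t S.toArray (PySem.List.pyRange ((p - 1) + c * m) (S.length : Int) m) c rans
        = rans.reverse ++ pickA t m p (S.length : Int) S c := by
  intro k
  induction k using Nat.strong_induction_on with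
  | _ k ih =>
    intro c rans hc0 hk
    by_cases hL : (p - 1) + c * m < (S.length : Int)
    · rw [pyRange_pos_cons _ _ _ (by omega) hL]
      by_cases hc : c < t
      · rw [selLoop, if_pos hc]
        have harg : (p - 1) + c * m + m = (p - 1) + (c + 1) * m := by ring
        rw [harg, ih (t - (c + 1)).toNat (by omega) (c + 1) _ (by omega) rfl]
        have hunf : pickA t m p (S.length : Int) S c
            = PySem.List.pyGetD S ((p - 1) + c * m) '!'
                :: pickA t m p (S.length : Int) S (c + 1) := by
          conv_lhs => rw [pickA]
          rw [dif_pos ⟨hc, hL⟩]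
        rw [hunf, arr_get_eq S _ (by nlinarith) hL]
        simp
      · rw [selLoop, if_neg hc, pickA_stop t m p _ _ _ (by omega)]
        simp
    · rw [pyRange_pos_nil _ _ _ (by omega) (by omega), selLoop,
          pickA, dif_neg (by rintro ⟨-, h⟩; exact hL h)]
      simp

theorem simLoop (n t m p : Int) (hn2 : 2 ≤ n) (hn16 : n ≤ 16) (mt : Int) :
    ∀ (fuel : Nat) (r : List Char) (val : Int) (rout : List Char) (c : Int),
      0 ≤ val → 1 ≤ fuel → mt - (r.length : Int) < (fuel : Int) →
      ∃ tail, buildLoop n mt fuel r (r.length : Int) val = some (r.reverse ++ tail) ∧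
        altLoop n t m p mt fuel (r.length : Int) val rout c
          = ((r.reverse ++ tail).drop r.length |>.foldl (altStep t m p)
               ((r.length : Int), rout, c)).2.1 := by
  intro fuel
  induction fuel with
  | zero => intro r val rout c _ hf _; omega
  | succ f ih =>
    intro r val rout c hval _ hfuel
    by_cases hlt : ((r.length : Int)) < mt
    · have hz := digits_eq n val hn2 hn16 hval
      have hne := toBase_ne_nil n (val.toNat + 1) (by omega) val
      set ds := toBase n (val.toNat + 1) val with hds
      have hd1 : 1 ≤ ds.length := List.length_pos_iff.mpr hne
      have hrl : ((ds.reverse ++ r).length : Int) = (r.length : Int) + (ds.length : Int) := by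
        simp [List.length_append]; omega
      have hst := foldl_state t m p ds ((r.length : Int)) rout c
      obtain ⟨tail', h1, h2⟩ := ih (ds.reverse ++ r) (val + 1)
        ((pickF t m p ds ((r.length : Int)) c).reverse ++ rout)
        (c + ((pickF t m p ds ((r.length : Int)) c).length : Int))
        (by omega)
        (by push_cast at hfuel; omega)
        (by rw [hrl]; push_cast at hfuel ⊢; omega)
      refine ⟨ds ++ tail', ?_, ?_⟩
      · rw [buildLoop, if_pos hlt, hz]
        show buildLoop n mt f (ds.reverse ++ r) ((r.length : Int) + (ds.length : Int)) (val + 1)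
            = some (r.reverse ++ (ds ++ tail'))
        rw [show ((r.length : Int) + (ds.length : Int)) = ((ds.reverse ++ r).length : Int)
              from hrl.symm, h1]
        congr 1
        simp [List.reverse_append, List.append_assoc]
      · simp only [altLoop, if_pos hlt]
        rw [← hds, hst]
        dsimp only
        have hsplit : (r.reverse ++ (ds ++ tail')).drop r.length = ds ++ tail' := by
          rw [show r.length = r.reverse.length by simp, List.drop_left]
        have hsplit' : ((ds.reverse ++ r).reverse ++ tail').drop (ds.reverse ++ r).length
            = tail' := by
          rw [show (ds.reverse ++ r).length = ((ds.reverse ++ r).reverse).length by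
                rw [List.length_reverse], List.drop_left]
        rw [show ((r.length : Int) + (ds.length : Int)) = ((ds.reverse ++ r).length : Int)
              from hrl.symm, h2, hsplit', hsplit, List.foldl_append, hst, hrl]
    · refine ⟨[], ?_, ?_⟩
      · rw [buildLoop, if_neg hlt]
        simp
      · rw [altLoop, if_neg hlt]
        rw [List.append_nil, show r.length = r.reverse.length by simp, List.drop_length]
        rfl

theorem pyRange_neg_nil (a b s : Int) (hs : s < 0) (h : a ≤ b) :
    PySem.List.pyRange a b s = [] := by
  simp [PySem.List.pyRange, show ¬ s = 0 by omega, show ¬ 0 < s by omega, show ¬ b < a by omega]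

theorem selLoop_nonpos (t : Int) (arr : Array Char) (l : List Int) (ht : t ≤ 0) :
    selLoop t arr l 0 [] = [] := by
  cases l with
  | nil => rfl
  | cons i rest => rw [selLoop, if_neg (by omega)]; rfl

-- ===== VERDICT (by name: the statement is the Claim_ definition above) =====
theorem solution_spec : Claim_equal_solution := by
  intro n t m p _ hpre
  unfold Spec_solution solution solution_alt
  rcases hpre with ⟨hn2, hn16, ht, hm, hp⟩ | ⟨hm, ht⟩ | ⟨hm, ht, hp⟩ | ⟨hm, ht, hn2, hn16⟩
  · -- natural domain: the streaming pass reproduces the build-then-index result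
    obtain ⟨S, hbuild, halt⟩ := simLoop n t m p hn2 hn16 (m * t) ((m * t).toNat + 1) [] 0 [] 0
      le_rfl (by omega) (by simp only [List.length_nil, Int.natCast_zero]; omega)
    simp only [List.length_nil, Int.natCast_zero, List.reverse_nil, List.nil_append,
      List.drop_zero] at hbuild halt
    simp only [hbuild]
    rw [halt, foldl_state]
    have hB : pickF t m p S 0 0 = pickA t m p (S.length : Int) S 0 := by
      exact pickF_eq_pickA t m p hm S S 0 0 le_rfl (by nlinarith) (by simp)
    have hA : selLoop t S.toArray (PySem.List.pyRange (p - 1) (S.length : Int) m) 0 []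
        = [].reverse ++ pickA t m p (S.length : Int) S 0 := by
      have := selLoop_eq t m p hm hp S (t - 0).toNat 0 [] le_rfl rfl
      simpa using this
    rw [hA]
    simp [hB]
  · -- 1 ≤ m, t ≤ 0: A never selects (cnt < t fails at once), B never collects
    have hmt : ¬ ((0 : Int) < m * t) := by nlinarith
    rw [buildLoop, if_neg (by simpa using hmt), altLoop, if_neg hmt]
    simp [selLoop_nonpos t _ _ (by omega)]
  · -- m ≤ -1, 0 ≤ t, p ≤ 1: the built string is empty and the negative-step range is empty
    have hmt : ¬ ((0 : Int) < m * t) := by nlinarith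
    rw [buildLoop, if_neg (by simpa using hmt), altLoop, if_neg hmt]
    simp only [List.reverse_nil]
    rw [pyRange_neg_nil _ _ _ (by omega) (by simp; omega)]
    rfl
  · -- m ≤ -1, t ≤ -1: the string is built, but neither side ever selects a character
    obtain ⟨S, hbuild, halt⟩ := simLoop n t m p hn2 hn16 (m * t) ((m * t).toNat + 1) [] 0 [] 0
      le_rfl (by omega) (by simp only [List.length_nil, Int.natCast_zero]; omega)
    simp only [List.length_nil, Int.natCast_zero, List.reverse_nil, List.nil_append,
      List.drop_zero] at hbuild halt
    simp only [hbuild]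
    rw [halt, foldl_state, selLoop_nonpos t _ _ (by omega),
        pickF_stop t m p _ _ _ (by omega)]
    rfl
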